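-- pv_equiv track=rewrite | github.com/np2334/strypes-2022-internship | Homework_02/Exercise_05.py | contains_digit
-- ===== SOURCE A (Python) =====
-- def get_number_length(n):
--     length = 0
--     while n != 0:
--         length += 1
--         n //= 10
--     return length
--
-- def contains_digit(number, digit):
--     numberLength = get_number_length(number)
--
--     for i in range(0, numberLength):
--         currentNumber = number % 10
--         number //= 10
--         if currentNumber == digit:
--             return True
--     return False
-- ===== SOURCE B (Python) =====
-- def contains_digit(number, digit):
--     # idiomatic: a number contains a digit iff that digit's character
--     # occurs in its decimal representation (only 0-9 can be digits at all)
--     return 0 <= digit <= 9 and str(digit) in str(number)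
-- ===== Notes on version B (the rewrite author's own statement) =====
-- stated objective: idiomatic
-- what changed: B replaces A's two arithmetic passes (digit count, then a %10//10 extraction loop) with a string-membership test: str(digit) in str(number), guarded by 0 <= digit <= 9.
-- intended difference: On number=0 with digit=0 A returns False (its length pre-pass counts 0 digits so the loop never runs) while B returns True, which is intended since the decimal representation of 0 is '0' and does contain the digit 0. — e.g. on contains_digit(0, 0): A returns false, B returns true
import Mathlib
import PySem

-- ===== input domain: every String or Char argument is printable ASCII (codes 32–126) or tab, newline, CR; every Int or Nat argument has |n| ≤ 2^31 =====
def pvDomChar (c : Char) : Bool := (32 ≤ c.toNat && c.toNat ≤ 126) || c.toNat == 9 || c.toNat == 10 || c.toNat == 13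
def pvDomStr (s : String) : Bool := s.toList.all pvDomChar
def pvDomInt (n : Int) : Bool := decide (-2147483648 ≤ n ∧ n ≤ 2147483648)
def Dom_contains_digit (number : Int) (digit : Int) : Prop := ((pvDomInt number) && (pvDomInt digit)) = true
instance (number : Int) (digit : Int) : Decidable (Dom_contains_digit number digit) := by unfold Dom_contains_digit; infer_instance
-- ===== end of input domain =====

-- B replaces A's two arithmetic passes with a string-membership test (objective: idiomatic).

-- ===== PORT A =====
-- A's get_number_length loop; on n < 0 Python loops forever (excluded by Pre_),
-- so the port recurses on n.toNat, which is exact for every n ≥ 0.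
def pyLenNat : Nat → Nat
  | 0 => 0
  | Nat.succ n => pyLenNat ((Nat.succ n) / 10) + 1
decreasing_by exact Nat.div_lt_self (Nat.succ_pos n) (by norm_num)

def get_number_length (n : Int) : Int := (pyLenNat n.toNat : Int)

-- the 'for i in range(0, numberLength)' loop of A, fuel = numberLength
def cdLoopA : Nat → Int → Int → Bool
  | 0, _, _ => false
  | Nat.succ k, number, digit =>
    let currentNumber := PySem.Int.mod number 10
    let number' := PySem.Int.floordiv number 10
    if currentNumber = digit then true else cdLoopA k number' digit

def contains_digit (number : Int) (digit : Int) : Bool :=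
  cdLoopA (get_number_length number).toNat number digit

-- ===== PORT B =====
-- Source B: return 0 <= digit <= 9 and str(digit) in str(number)
def contains_digit_alt (number : Int) (digit : Int) : Bool :=
  decide (0 ≤ digit) && decide (digit ≤ 9)
    && PySem.Str.isIn (PySem.Int.toStr digit) (PySem.Int.toStr number)

-- ===== PRECONDITION & SPEC =====
-- Pre_ excludes number < 0, on which A never returns (get_number_length's loop never reaches 0).
def Pre_contains_digit (number : Int) (digit : Int) : Prop := 0 ≤ number
instance (number : Int) (digit : Int) : Decidable (Pre_contains_digit number digit) := by unfold Pre_contains_digit; infer_instance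
def pvWitness_contains_digit : Int × Int := (274, 7)

-- On number=0, digit=0 A returns False (its length pre-pass counts 0 digits, so the check
-- loop never runs) while B returns True, which is intended: str(0) = "0" contains the digit 0.
def D_contains_digit (number : Int) (digit : Int) : Prop := number = 0 ∧ digit = 0
instance (number : Int) (digit : Int) : Decidable (D_contains_digit number digit) := by unfold D_contains_digit; infer_instance

def Spec_contains_digit (number : Int) (digit : Int) (out : Bool) : Prop := ¬ D_contains_digit number digit → out = contains_digit_alt number digit
instance (number : Int) (digit : Int) (out : Bool) : Decidable (Spec_contains_digit number digit out) := by unfold Spec_contains_digit; infer_instance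

def pvDiffWitness_contains_digit : Int × Int := (0, 0)
def pvDiffWitnessOut_contains_digit : Bool × Bool := (false, true)

-- ===== CLAIM (what is proved, stated in full; the proofs are below) =====
def Claim_unchanged_contains_digit : Prop := ∀ (number : Int) (digit : Int), Dom_contains_digit number digit → Pre_contains_digit number digit → Spec_contains_digit number digit (contains_digit number digit)
def Claim_changed_contains_digit : Prop := Dom_contains_digit (pvDiffWitness_contains_digit.1) (pvDiffWitness_contains_digit.2) ∧ Pre_contains_digit (pvDiffWitness_contains_digit.1) (pvDiffWitness_contains_digit.2) ∧ D_contains_digit (pvDiffWitness_contains_digit.1) (pvDiffWitness_contains_digit.2) ∧ contains_digit (pvDiffWitness_contains_digit.1) (pvDiffWitness_contains_digit.2) = pvDiffWitnessOut_contains_digit.1 ∧ contains_digit_alt (pvDiffWitness_contains_digit.1) (pvDiffWitness_contains_digit.2) = pvDiffWitnessOut_contains_digit.2 ∧ pvDiffWitnessOut_contains_digit.1 ≠ pvDiffWitnessOut_contains_digit.2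
def Claim_exact_contains_digit : Prop := ∀ (number : Int) (digit : Int), Dom_contains_digit number digit → Pre_contains_digit number digit → D_contains_digit number digit → contains_digit number digit ≠ contains_digit_alt number digit

-- ===== LEMMAS AND PROOFS =====

-- with enough fuel, toDigitsCore is toDigits with the accumulator appended
theorem tdc_fuel : ∀ (n : Nat), ∀ fuel ds, n < fuel →
    Nat.toDigitsCore 10 fuel n ds = Nat.toDigits 10 n ++ ds := by
  intro n
  induction n using Nat.strong_induction_on with
  | _ n ih =>
    intro fuel ds hf
    match fuel, hf with
    | Nat.succ f, hf =>
      by_cases h : n / 10 = 0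
      · simp [Nat.toDigitsCore, Nat.toDigits, h]
      · have hn : 0 < n := by omega
        have hlt : n / 10 < n := Nat.div_lt_self hn (by norm_num)
        rw [Nat.toDigitsCore]
        simp only [h, if_false]
        rw [ih (n / 10) hlt f _ (by omega)]
        conv_rhs => rw [Nat.toDigits, Nat.toDigitsCore]
        simp only [h, if_false]
        rw [ih (n / 10) hlt n _ (by omega)]
        simp

theorem toDigits_small (n : Nat) (h : n < 10) : Nat.toDigits 10 n = [Nat.digitChar n] := by
  rw [Nat.toDigits, Nat.toDigitsCore]
  simp [Nat.div_eq_of_lt h, Nat.mod_eq_of_lt h]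

theorem toDigits_rec (n : Nat) (h : 10 ≤ n) :
    Nat.toDigits 10 n = Nat.toDigits 10 (n / 10) ++ [Nat.digitChar (n % 10)] := by
  have h10 : ¬ n / 10 = 0 := by
    have := Nat.div_pos h (by norm_num : 0 < 10)
    omega
  rw [Nat.toDigits, Nat.toDigitsCore]
  simp only [h10, if_false]
  exact tdc_fuel (n / 10) n _ (by have := Nat.div_lt_self (by omega : 0 < n) (by norm_num : 1 < 10); omega)

theorem digitChar_inj (a b : Nat) (ha : a < 10) (hb : b < 10) :
    Nat.digitChar a = Nat.digitChar b ↔ a = b := by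
  interval_cases a <;> interval_cases b <;> simp [Nat.digitChar]

-- A's loop never succeeds on a digit outside 0..9 when scanning a nonnegative number
theorem cdLoopA_out_of_range : ∀ (fuel : Nat) (m : Nat) (d : Int), (d < 0 ∨ 9 < d) →
    cdLoopA fuel (m : Int) d = false := by
  intro fuel
  induction fuel with
  | zero => intro m d _; rfl
  | succ k ih =>
    intro m d hd
    rw [cdLoopA]
    have hmod : PySem.Int.mod (m : Int) 10 = ((m % 10 : Nat) : Int) := by
      rw [PySem.Int.mod_eq_emod_of_pos (by norm_num : (0:Int) < 10)]; exact_mod_cast rfl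
    have hdiv : PySem.Int.floordiv (m : Int) 10 = ((m / 10 : Nat) : Int) := by
      rw [PySem.Int.floordiv_eq_ediv_of_pos (by norm_num : (0:Int) < 10)]; exact_mod_cast rfl
    have hne : ¬ ((m % 10 : Nat) : Int) = d := by
      have := Nat.mod_lt m (by norm_num : 0 < 10)
      omega
    simp only [hmod, hdiv, if_neg hne]
    exact ih (m / 10) d hd

-- core equivalence: for m > 0 and a one-digit d, A's loop finds d iff
-- d's character occurs in the decimal representation of m
theorem cd_main : ∀ (m : Nat) (d : Nat), d < 10 → 0 < m →
    (cdLoopA (pyLenNat m) (m : Int) (d : Int) = true ↔ Nat.digitChar d ∈ Nat.toDigits 10 m) := by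
  intro m
  induction m using Nat.strong_induction_on with
  | _ m ih =>
    intro d hd hm
    match m, hm with
    | Nat.succ n, _ =>
      rw [pyLenNat, cdLoopA]
      have hmod : PySem.Int.mod ((Nat.succ n : Nat) : Int) 10 = ((Nat.succ n % 10 : Nat) : Int) := by
        rw [PySem.Int.mod_eq_emod_of_pos (by norm_num : (0:Int) < 10)]; exact_mod_cast rfl
      have hdiv : PySem.Int.floordiv ((Nat.succ n : Nat) : Int) 10 = ((Nat.succ n / 10 : Nat) : Int) := by
        rw [PySem.Int.floordiv_eq_ediv_of_pos (by norm_num : (0:Int) < 10)]; exact_mod_cast rfl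
      simp only [hmod, hdiv]
      by_cases hsmall : Nat.succ n < 10
      · rw [toDigits_small _ hsmall]
        have h0 : Nat.succ n / 10 = 0 := Nat.div_eq_of_lt hsmall
        have hmm : Nat.succ n % 10 = Nat.succ n := Nat.mod_eq_of_lt hsmall
        rw [hmm, h0]
        simp only [pyLenNat, cdLoopA, List.mem_singleton]
        rw [digitChar_inj d (Nat.succ n) hd hsmall]
        by_cases he : ((Nat.succ n : Nat) : Int) = (d : Int)
        · simp only [if_pos he]; simp; omega
        · simp only [if_neg he]; simp; omega
      · have hge : 10 ≤ Nat.succ n := by omega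
        rw [toDigits_rec _ hge]
        have hlt : Nat.succ n / 10 < Nat.succ n := Nat.div_lt_self (Nat.succ_pos n) (by norm_num)
        have hpos : 0 < Nat.succ n / 10 := Nat.div_pos hge (by norm_num)
        rw [List.mem_append, List.mem_singleton]
        rw [← ih (Nat.succ n / 10) hlt d hd hpos]
        have hmlt : Nat.succ n % 10 < 10 := Nat.mod_lt _ (by norm_num)
        rw [digitChar_inj d (Nat.succ n % 10) hd hmlt]
        by_cases he : ((Nat.succ n % 10 : Nat) : Int) = (d : Int)
        · rw [if_pos he]
          have hde : d = Nat.succ n % 10 := by omega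
          simp [hde]
        · rw [if_neg he]
          have hne : ¬ d = Nat.succ n % 10 := by omega
          simp [hne]

-- str(d) for one-digit d is a single character
theorem toChars_single (d : Int) (h0 : 0 ≤ d) (h9 : d ≤ 9) :
    PySem.Int.toChars d = [Nat.digitChar d.toNat] := by
  rw [PySem.Int.toChars]
  rw [if_neg (by omega)]
  exact toDigits_small d.toNat (by omega)

-- ===== VERDICT (by name: the statement is the Claim_ definition above) =====
theorem contains_digit_spec : Claim_unchanged_contains_digit := by
  intro number digit _ hpre hD
  unfold contains_digit get_number_length contains_digit_alt
  rw [Int.toNat_natCast]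
  have hnum : ((number.toNat : Nat) : Int) = number := Int.toNat_of_nonneg hpre
  by_cases hdig : 0 ≤ digit ∧ digit ≤ 9
  · obtain ⟨h0, h9⟩ := hdig
    by_cases hzero : number = 0
    · -- number = 0: A's loop has no iterations; B matches since digit ≠ 0 here
      have hdne : digit ≠ 0 := fun h => hD ⟨hzero, h⟩
      subst hzero
      have h0 : pyLenNat (Int.toNat 0) = 0 := by simp [pyLenNat]
      rw [h0]
      interval_cases digit <;> first | (exfalso; exact hdne rfl) | decide
    · have hmpos : 0 < number.toNat := by omega
      rw [decide_eq_true h0, decide_eq_true h9]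
      simp only [Bool.true_and]
      rw [Bool.eq_iff_iff]
      rw [PySem.Str.isIn_iff_infix, PySem.Int.toList_toStr, PySem.Int.toList_toStr,
          toChars_single digit h0 h9]
      have hchars : PySem.Int.toChars number = Nat.toDigits 10 number.toNat := by
        rw [PySem.Int.toChars, if_neg (by omega)]
      rw [hchars, List.singleton_infix_iff]
      have := cd_main number.toNat digit.toNat (by omega) hmpos
      rw [hnum] at this
      rw [(by omega : ((digit.toNat : Nat) : Int) = digit)] at this
      exact this
  · -- digit outside 0..9: both sides are false
    have hfalse : (decide (0 ≤ digit) && decide (digit ≤ 9)) = false := by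
      rcases not_and_or.mp hdig with h | h <;> simp [h]
    rw [hfalse, Bool.false_and]
    rw [← hnum]
    exact cdLoopA_out_of_range _ number.toNat digit (by omega)

theorem contains_digit_A_zero : contains_digit 0 0 = false := by
  simp [contains_digit, get_number_length, pyLenNat, cdLoopA]

theorem contains_digit_changed : Claim_changed_contains_digit := by
  unfold Claim_changed_contains_digit
  exact ⟨by decide, by decide, by decide, contains_digit_A_zero, by decide, by decide⟩

theorem contains_digit_tight : Claim_exact_contains_digit := by
  intro number digit _ _ hD
  obtain ⟨h1, h2⟩ := hD
  subst h1; subst h2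
  rw [contains_digit_A_zero]
  decide
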